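-- pv_equiv track=rewrite | github.com/paiml/depyler | examples/hard_group_count.py | elements_appearing_n_times
-- ===== SOURCE A (Python) =====
-- def count_occurrences(arr: list[int]) -> dict[str, int]:
--     """Count occurrences of each element. Keys are string representations."""
--     counts: dict[str, int] = {}
--     idx: int = 0
--     length: int = len(arr)
--     while idx < length:
--         val_str: str = str(arr[idx])
--         if val_str in counts:
--             counts[val_str] = counts[val_str] + 1
--         else:
--             counts[val_str] = 1
--         idx = idx + 1
--     return counts
--
-- def elements_appearing_n_times(arr: list[int], n: int) -> list[int]:
--     """Return elements appearing exactly n times."""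
--     counts: dict[str, int] = count_occurrences(arr)
--     result: list[int] = []
--     seen_already: dict[str, int] = {}
--     idx: int = 0
--     length: int = len(arr)
--     while idx < length:
--         val_str: str = str(arr[idx])
--         if val_str not in seen_already:
--             if val_str in counts and counts[val_str] == n:
--                 result.append(arr[idx])
--             seen_already[val_str] = 1
--         idx = idx + 1
--     return result
-- ===== SOURCE B (Python) =====
-- def elements_appearing_n_times(arr: list[int], n: int) -> list[int]:
--     """Return elements appearing exactly n times."""
--     counts: dict[str, int] = {}
--     first: dict[str, int] = {}
--     for v in arr:
--         s = str(v)
--         counts[s] = counts.get(s, 0) + 1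
--         if s not in first:
--             first[s] = v
--     return [first[s] for s, c in counts.items() if c == n]
-- ===== Notes on version B (the rewrite author's own statement) =====
-- stated objective: simpler
-- what changed: B makes a single pass over arr that builds the counts dict and a first-occurrence dict together, then reads the result directly off counts.items(), eliminating A's second full scan of arr and its seen_already dedup dict.
import Mathlib
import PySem

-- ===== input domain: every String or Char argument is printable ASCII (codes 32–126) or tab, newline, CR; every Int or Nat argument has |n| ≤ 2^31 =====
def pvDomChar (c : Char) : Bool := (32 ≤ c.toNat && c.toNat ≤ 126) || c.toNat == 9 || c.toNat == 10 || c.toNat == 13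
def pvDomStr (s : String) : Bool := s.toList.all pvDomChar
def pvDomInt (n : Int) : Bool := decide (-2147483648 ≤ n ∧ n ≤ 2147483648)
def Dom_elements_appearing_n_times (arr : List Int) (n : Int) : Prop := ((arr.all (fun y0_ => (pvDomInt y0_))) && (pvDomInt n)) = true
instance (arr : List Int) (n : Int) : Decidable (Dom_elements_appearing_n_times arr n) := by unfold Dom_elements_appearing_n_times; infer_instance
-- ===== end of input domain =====

-- B replaces A's second full scan of `arr` plus the `seen_already` dedup dict by a single
-- pass that also records each key's first value, then reads the result off `counts.items()`
-- (objective: simpler — one array pass instead of two, no dedup dict).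

-- ===== PORT A =====
def count_occurrences (arr : List Int) : PySem.Dict String Int :=
  arr.foldl (fun counts v =>
    let val_str := PySem.Int.toStr v
    match counts.get? val_str with
    | some c => counts.insert val_str (c + 1)
    | none   => counts.insert val_str 1) PySem.Dict.empty

def elements_appearing_n_times (arr : List Int) (n : Int) : List Int :=
  let counts := count_occurrences arr
  (arr.foldl (fun (st : List Int × PySem.Dict String Int) v =>
      let val_str := PySem.Int.toStr v
      if !st.2.contains val_str then
        ((if counts.contains val_str && (counts.getD val_str 0 == n) then st.1 ++ [v] else st.1),
         st.2.insert val_str 1)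
      else st)
    ([], PySem.Dict.empty)).1

-- ===== PORT B =====
def elements_appearing_n_times_alt (arr : List Int) (n : Int) : List Int :=
  let st := arr.foldl (fun (p : PySem.Dict String Int × PySem.Dict String Int) v =>
      let s := PySem.Int.toStr v
      (p.1.insert s (p.1.getD s 0 + 1),
       if !p.2.contains s then p.2.insert s v else p.2))
    (PySem.Dict.empty, PySem.Dict.empty)
  -- `first[s]`: every key of counts is a key of first, so the getD default is never used
  (st.1.items.filter (fun q => q.2 == n)).map (fun q => st.2.getD q.1 0)

-- ===== PRECONDITION & SPEC =====
def Spec_elements_appearing_n_times (arr : List Int) (n : Int) (out : List Int) : Prop := out = elements_appearing_n_times_alt arr n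
instance (arr : List Int) (n : Int) (out : List Int) : Decidable (Spec_elements_appearing_n_times arr n out) := by unfold Spec_elements_appearing_n_times; infer_instance

-- ===== CLAIM (what is proved, stated in full; the proofs are below) =====
def Claim_equal_elements_appearing_n_times : Prop := ∀ (arr : List Int) (n : Int), Dom_elements_appearing_n_times arr n → Spec_elements_appearing_n_times arr n (elements_appearing_n_times arr n)

-- ===== LEMMAS AND PROOFS =====

-- `ff seen l`: the elements of `l` that are the first occurrence of their str-key, keys in `seen` excluded
def ff (seen : List String) : List Int → List Int
  | [] => []
  | v :: t =>
      if PySem.Int.toStr v ∈ seen then ff seen t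
      else v :: ff (seen ++ [PySem.Int.toStr v]) t

theorem mem_of_mem_ff (seen : List String) (l : List Int) (v : Int) (h : v ∈ ff seen l) : v ∈ l := by
  induction l generalizing seen with
  | nil => simp [ff] at h
  | cons w t ih =>
    simp only [ff] at h
    split at h
    · exact List.mem_cons_of_mem _ (ih _ h)
    · rcases List.mem_cons.mp h with h | h
      · simp [h]
      · exact List.mem_cons_of_mem _ (ih _ h)

-- A's counting loop is the string-keyed counter
theorem count_occurrences_eq (arr : List Int) :
    count_occurrences arr = PySem.Dict.counter (arr.map PySem.Int.toStr) := by
  rw [← PySem.Dict.foldl_insert_getD_add_one_eq_counter, List.foldl_map]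
  unfold count_occurrences
  congr 1
  funext d v
  rcases h : d.get? (PySem.Int.toStr v) with _ | c <;>
    simp [h, PySem.Dict.getD_eq_get?_getD]

-- the pair loop of B splits into its two independent components
theorem b_fold_split (arr : List Int) :
    arr.foldl (fun (p : PySem.Dict String Int × PySem.Dict String Int) v =>
      let s := PySem.Int.toStr v
      (p.1.insert s (p.1.getD s 0 + 1),
       if !p.2.contains s then p.2.insert s v else p.2))
      (PySem.Dict.empty, PySem.Dict.empty)
    = (arr.foldl (fun d v => d.insert (PySem.Int.toStr v) (d.getD (PySem.Int.toStr v) 0 + 1)) PySem.Dict.empty,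
       arr.foldl (fun d v => if !d.contains (PySem.Int.toStr v) then d.insert (PySem.Int.toStr v) v else d) PySem.Dict.empty) := by
  exact PySem.List.foldl_prod_mk
    (f := fun (d : PySem.Dict String Int) v => d.insert (PySem.Int.toStr v) (d.getD (PySem.Int.toStr v) 0 + 1))
    (g := fun (d : PySem.Dict String Int) v => if !d.contains (PySem.Int.toStr v) then d.insert (PySem.Int.toStr v) v else d)
    arr PySem.Dict.empty PySem.Dict.empty

-- the first-occurrence dict never overwrites an existing key
theorem first_get?_frozen (l : List Int) (d : PySem.Dict String Int) (s : String)
    (h : d.contains s = true) :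
    (l.foldl (fun d v => if !d.contains (PySem.Int.toStr v) then d.insert (PySem.Int.toStr v) v else d) d).get? s = d.get? s := by
  induction l generalizing d with
  | nil => rfl
  | cons w t ih =>
    simp only [List.foldl_cons]
    by_cases hc : d.contains (PySem.Int.toStr w) = true
    · simp only [hc, Bool.not_true]
      exact ih d h
    · have hne : s ≠ PySem.Int.toStr w := by
        intro he; rw [he] at h; exact hc h
      simp only [Bool.not_eq_true] at hc
      simp only [hc, Bool.not_false, if_true]
      rw [ih _ (by simp [PySem.Dict.contains_insert, h]),
        PySem.Dict.get?_insert_of_ne _ _ hne]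

-- looking up a first occurrence in the first-occurrence dict gives it back
theorem first_getD (l : List Int) (d : PySem.Dict String Int) (v : Int)
    (h : v ∈ ff d.keys l) :
    (l.foldl (fun d v => if !d.contains (PySem.Int.toStr v) then d.insert (PySem.Int.toStr v) v else d) d).getD (PySem.Int.toStr v) 0 = v := by
  induction l generalizing d with
  | nil => simp [ff] at h
  | cons w t ih =>
    simp only [ff] at h
    simp only [List.foldl_cons]
    by_cases hc : d.contains (PySem.Int.toStr w) = true
    · rw [if_pos ((PySem.Dict.contains_iff_mem_keys _ _).mp hc)] at h
      simp only [hc, Bool.not_true]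
      exact ih d h
    · rw [if_neg (fun hm => hc ((PySem.Dict.contains_iff_mem_keys _ _).mpr hm))] at h
      simp only [Bool.not_eq_true] at hc
      simp only [hc, Bool.not_false, if_true]
      rcases List.mem_cons.mp h with h | h
      · subst h
        rw [PySem.Dict.getD_eq_get?_getD,
          first_get?_frozen _ _ _ (by simp),
          PySem.Dict.get?_insert_self]
        rfl
      · have hk : (d.insert (PySem.Int.toStr w) w).keys = d.keys ++ [PySem.Int.toStr w] :=
          PySem.Dict.keys_insert_of_not_contains _ _ hc
        exact ih (d.insert (PySem.Int.toStr w) w) (by rw [hk]; exact h)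

-- ordered dedup of the keys is the key image of the first occurrences
theorem set_update_eq_ff (l : List Int) (S : List String) :
    PySem.Set.update S (l.map PySem.Int.toStr) = S ++ (ff S l).map PySem.Int.toStr := by
  induction l generalizing S with
  | nil => simp [ff, PySem.Set.update_nil]
  | cons w t ih =>
    simp only [List.map_cons, PySem.Set.update_cons, ff]
    by_cases hm : PySem.Int.toStr w ∈ S
    · rw [PySem.Set.add_of_mem hm, if_pos hm, ih]
    · rw [PySem.Set.add_of_not_mem hm, if_neg hm, ih]
      simp

-- B's counting component is the same string-keyed counter
theorem b_counts_eq (arr : List Int) :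
    arr.foldl (fun d v => d.insert (PySem.Int.toStr v) (d.getD (PySem.Int.toStr v) 0 + 1)) PySem.Dict.empty
    = PySem.Dict.counter (arr.map PySem.Int.toStr) := by
  rw [← PySem.Dict.foldl_insert_getD_add_one_eq_counter, List.foldl_map]

-- A's second loop collects exactly the first occurrences passing the test
theorem a_loop_eq (counts : PySem.Dict String Int) (n : Int) (l : List Int)
    (res : List Int) (seen : PySem.Dict String Int) :
    (l.foldl (fun (st : List Int × PySem.Dict String Int) v =>
      let val_str := PySem.Int.toStr v
      if !st.2.contains val_str then
        ((if counts.contains val_str && (counts.getD val_str 0 == n) then st.1 ++ [v] else st.1),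
         st.2.insert val_str 1)
      else st) (res, seen)).1
    = res ++ (ff seen.keys l).filter
        (fun v => counts.contains (PySem.Int.toStr v) && (counts.getD (PySem.Int.toStr v) 0 == n)) := by
  induction l generalizing res seen with
  | nil => simp [ff]
  | cons w t ih =>
    simp only [List.foldl_cons, ff]
    by_cases hc : seen.contains (PySem.Int.toStr w) = true
    · simp only [hc, Bool.not_true, if_pos ((PySem.Dict.contains_iff_mem_keys _ _).mp hc)]
      exact ih res seen
    · have hk : (seen.insert (PySem.Int.toStr w) 1).keys = seen.keys ++ [PySem.Int.toStr w] :=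
        PySem.Dict.keys_insert_of_not_contains _ _ (by simpa using hc)
      have hnm : PySem.Int.toStr w ∉ seen.keys :=
        fun hm => by simp [(PySem.Dict.contains_iff_mem_keys _ _).mpr hm] at hc
      simp only [Bool.not_eq_true] at hc
      simp only [hc, Bool.not_false, if_true, if_neg hnm]
      rw [ih, hk, List.filter_cons]
      by_cases hcond : (counts.contains (PySem.Int.toStr w) && (counts.getD (PySem.Int.toStr w) 0 == n)) = true
      · simp [hcond]
      · simp [hcond]

-- ===== VERDICT (by name: the statement is the Claim_ definition above) =====
theorem elements_appearing_n_times_spec : Claim_equal_elements_appearing_n_times := by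
  intro arr n _
  unfold Spec_elements_appearing_n_times
  unfold elements_appearing_n_times elements_appearing_n_times_alt
  rw [b_fold_split]
  simp only
  rw [a_loop_eq, count_occurrences_eq, b_counts_eq, PySem.Dict.items_counter,
    ← PySem.Set.update_nil_left, set_update_eq_ff, List.nil_append, List.nil_append,
    List.map_map, List.filter_map, List.map_map]
  have hkeys : (PySem.Dict.empty : PySem.Dict String Int).keys = [] := rfl
  rw [hkeys]
  trans (ff [] arr).filter (fun v => (((arr.map PySem.Int.toStr).count (PySem.Int.toStr v) : Int)) == n)
  · refine List.filter_congr ?_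
    intro v hv
    have hva : v ∈ arr := mem_of_mem_ff [] arr v hv
    have hcont : PySem.Int.toStr v ∈ arr.map PySem.Int.toStr := List.mem_map_of_mem hva
    simp [PySem.Dict.contains_counter, PySem.Dict.getD_counter, List.contains_eq_mem, hcont]
  · simp only [Function.comp_def]
    symm
    refine (List.map_congr_left ?_).trans (List.map_id' _)
    intro v hv
    have hv' : v ∈ ff [] arr := List.mem_of_mem_filter hv
    simpa using first_getD arr PySem.Dict.empty v (by rw [hkeys]; exact hv')
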